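-- pv_equiv track=rewrite | github.com/dhan-02/Abhiyaan_Software | B1_Programming_new/B1_Abhiyaan_Arrayswaps.py | zeroes_first
-- ===== SOURCE A (Python) =====
-- def zeroes_first(Arr):
--
--     swaps = 0
--     count_one = 0
--
--     for i in range(len(Arr)):
--         if Arr[i] == 1:
--             count_one += 1
--         else:
--             swaps += count_one
--     return swaps
-- ===== SOURCE B (Python) =====
-- def zeroes_first(Arr):
--     zs = [i for i, x in enumerate(Arr) if x != 1]
--     z = len(zs)
--     return sum(zs) - z * (z - 1) // 2
-- ===== Notes on version B (the rewrite author's own statement) =====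
-- stated objective: alternative
-- what changed: Replaces A's running (swaps,count_one) accumulator loop with a closed form over the positions of non-one elements: sum of those indices minus z*(z-1)//2, using ones-before-the-k-th-zero = index - k.
import Mathlib
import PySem

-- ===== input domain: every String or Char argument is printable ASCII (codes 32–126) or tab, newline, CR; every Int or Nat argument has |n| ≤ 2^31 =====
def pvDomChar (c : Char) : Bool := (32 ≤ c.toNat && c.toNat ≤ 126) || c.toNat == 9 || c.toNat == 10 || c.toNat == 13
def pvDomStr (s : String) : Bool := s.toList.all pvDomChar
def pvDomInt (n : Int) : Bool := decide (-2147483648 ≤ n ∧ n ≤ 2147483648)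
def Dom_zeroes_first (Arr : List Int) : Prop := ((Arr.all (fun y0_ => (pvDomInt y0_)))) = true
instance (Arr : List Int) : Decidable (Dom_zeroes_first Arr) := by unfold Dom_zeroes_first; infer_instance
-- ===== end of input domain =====

-- B replaces A's running (swaps, count_one) accumulator with a closed form over the
-- indices of non-one elements (alternative decomposition, same O(n) cost).

-- ===== PORT A =====
-- for i in range(len(Arr)): if Arr[i]==1: count_one+=1 else: swaps+=count_one
def zeroes_first (Arr : List Int) : Int :=
  let st := (PySem.List.pyRange 0 (Arr.length : Int) 1).foldl
    (fun (p : Int × Int) i =>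
      if PySem.List.pyGetD Arr i 0 = 1 then (p.1, p.2 + 1) else (p.1 + p.2, p.2))
    (0, 0)
  st.1

-- ===== PORT B =====
-- zs = [i for i, x in enumerate(Arr) if x != 1]; z = len(zs); return sum(zs) - z*(z-1)//2
def zeroes_first_alt (Arr : List Int) : Int :=
  let zs := ((PySem.List.enumerate Arr 0).filter (fun p => decide (p.2 ≠ 1))).map (·.1)
  let z : Int := zs.length
  zs.sum - PySem.Int.floordiv (z * (z - 1)) 2

-- ===== PRECONDITION & SPEC =====
def Spec_zeroes_first (Arr : List Int) (out : Int) : Prop := out = zeroes_first_alt Arr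
instance (Arr : List Int) (out : Int) : Decidable (Spec_zeroes_first Arr out) := by unfold Spec_zeroes_first; infer_instance

-- ===== CLAIM (what is proved, stated in full; the proofs are below) =====
def Claim_equal_zeroes_first : Prop := ∀ (Arr : List Int), Dom_zeroes_first Arr → Spec_zeroes_first Arr (zeroes_first Arr)

-- ===== LEMMAS AND PROOFS =====

-- A's loop state after l equals (B's closed form on l, number of ones in l)
lemma loop_eq (l : List Int) :
    l.foldl (fun (p : Int × Int) x => if x = 1 then (p.1, p.2 + 1) else (p.1 + p.2, p.2)) (0, 0)
      = (zeroes_first_alt l, (l.countP (fun x => x == 1) : Int)) := by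
  induction l using List.reverseRecOn with
  | nil => simp [zeroes_first_alt, PySem.List.enumerate, PySem.Int.floordiv]
  | append_singleton l x ih =>
    rw [List.foldl_append, ih]
    have hcount : (((PySem.List.enumerate l 0).filter (fun p => !decide (p.2 = 1))).length : Int)
        + (l.countP (fun x => x == 1) : Int) = (l.length : Int) := by
      have h1 : ((PySem.List.enumerate l 0).filter (fun p => !decide (p.2 = 1))).length
          = l.countP (fun x : Int => !(x == 1)) := by
        rw [← List.countP_eq_length_filter]
        conv_rhs => rw [← PySem.List.map_snd_enumerate l 0]
        rw [List.countP_map]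
        rfl
      have h2 := List.length_eq_countP_add_countP (p := fun x : Int => x == 1) (l := l)
      simp only [decide_not, Bool.decide_eq_true] at h2
      omega
    by_cases hx : x = 1
    · simp [hx, zeroes_first_alt, PySem.List.enumerate_append, PySem.List.enumerate,
        List.countP_append]
    · simp only [zeroes_first_alt, PySem.List.enumerate_append, PySem.List.enumerate,
        List.filter_append, List.map_append, List.sum_append, List.countP_append,
        List.length_append]
      simp [hx]
      set L := ((((PySem.List.enumerate l)).filter (fun p => !decide (p.2 = 1))).length : Int) with hL
      have hd : (L + 1) * L / 2 = L * (L - 1) / 2 + L := by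
        have h2 : (L + 1) * L = L * (L - 1) + L * 2 := by ring
        rw [h2, Int.add_mul_ediv_right _ _ two_ne_zero]
      rw [hd]
      have hc : L + (l.countP (fun x => x == 1) : Int) = (l.length : Int) := hcount
      linarith

-- ===== VERDICT (by name: the statement is the Claim_ definition above) =====
theorem zeroes_first_spec : Claim_equal_zeroes_first := by
  intro Arr _
  unfold Spec_zeroes_first zeroes_first
  show (List.foldl (fun (p : Int × Int) i =>
      if PySem.List.pyGetD Arr i 0 = 1 then (p.1, p.2 + 1) else (p.1 + p.2, p.2)) (0, 0)
      (PySem.List.pyRange 0 (Arr.length : Int) 1)).1 = _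
  rw [PySem.List.foldl_pyRange_zero_pyGetD' Arr 0
    (fun (p : Int × Int) x => if x = 1 then (p.1, p.2 + 1) else (p.1 + p.2, p.2)) (0, 0)]
  rw [loop_eq]
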